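-- pv_equiv track=rewrite | github.com/maccmd/learning | main.py | allEven
-- ===== SOURCE A (Python) =====
-- def allEven(value):
--     i = int(value)
--     arr = []
--     while i > 0:
--         if i % 2 == 0:
--             arr.append(i)
--         i -= 1
--     return arr
-- ===== SOURCE B (Python) =====
-- def allEven(value):
--     i = int(value)
--     return list(range(i - i % 2, 0, -2))
-- ===== Notes on version B (the rewrite author's own statement) =====
-- stated objective: faster
-- what changed: Replaces the count-down loop with a per-element parity test by a single stepped range that starts at the largest even number not exceeding the input and visits only the evens.
import Mathlib
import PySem

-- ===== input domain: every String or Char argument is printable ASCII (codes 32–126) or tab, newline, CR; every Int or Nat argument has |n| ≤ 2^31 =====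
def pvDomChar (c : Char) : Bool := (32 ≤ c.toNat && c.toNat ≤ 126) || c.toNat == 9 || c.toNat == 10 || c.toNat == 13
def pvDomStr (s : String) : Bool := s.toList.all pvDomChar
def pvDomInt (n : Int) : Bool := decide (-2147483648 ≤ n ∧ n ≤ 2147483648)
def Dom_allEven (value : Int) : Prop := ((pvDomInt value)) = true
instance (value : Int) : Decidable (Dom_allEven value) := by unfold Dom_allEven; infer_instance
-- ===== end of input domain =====

-- B replaces A's count-down-by-1 loop with a parity test by one stepped range over the evens only (faster by a constant factor).

-- ===== PORT A =====
-- while i > 0: if i % 2 == 0: arr.append(i); i -= 1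
def allEvenLoop (i : Int) (arr : List Int) : List Int :=
  if i > 0 then
    allEvenLoop (i - 1) (if PySem.Int.mod i 2 == 0 then arr ++ [i] else arr)
  else arr
termination_by i.toNat
decreasing_by omega

def allEven (value : Int) : List Int :=
  allEvenLoop value []

-- ===== PORT B =====
-- list(range(i - i % 2, 0, -2))
def allEven_alt (value : Int) : List Int :=
  PySem.List.pyRange (value - PySem.Int.mod value 2) 0 (-2)

-- ===== PRECONDITION & SPEC =====
def Spec_allEven (value : Int) (out : List Int) : Prop := out = allEven_alt value
instance (value : Int) (out : List Int) : Decidable (Spec_allEven value out) := by unfold Spec_allEven; infer_instance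

-- ===== CLAIM (what is proved, stated in full; the proofs are below) =====
def Claim_equal_allEven : Prop := ∀ (value : Int), Dom_allEven value → Spec_allEven value (allEven value)

-- ===== LEMMAS AND PROOFS =====

-- the evens from n down to 2, largest first
def evensDown : Nat → List Int
  | 0 => []
  | n + 1 => if ((n : Int) + 1) % 2 = 0 then ((n : Int) + 1) :: evensDown n else evensDown n

theorem allEvenLoop_nonpos (i : Int) (arr : List Int) (h : ¬ i > 0) :
    allEvenLoop i arr = arr := by
  rw [allEvenLoop]; simp [h]

theorem allEvenLoop_eq (n : Nat) : ∀ (i : Int), i.toNat = n → ∀ (arr : List Int),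
    allEvenLoop i arr = arr ++ evensDown n := by
  induction n with
  | zero =>
      intro i hi arr
      rw [allEvenLoop_nonpos i arr (by omega)]
      simp [evensDown]
  | succ n ih =>
      intro i hi arr
      have hpos : i > 0 := by omega
      have hi' : i = (n : Int) + 1 := by omega
      rw [allEvenLoop]
      simp only [hpos, if_pos]
      rw [ih (i - 1) (by omega)]
      have hm : PySem.Int.mod i 2 = i % 2 :=
        PySem.Int.mod_eq_emod_of_pos (by omega)
      subst hi'
      by_cases he : ((n : Int) + 1) % 2 = 0
      · simp [he, evensDown]
      · simp [he, evensDown]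

theorem pyRange_neg_two_nil (a b : Int) (h : ¬ b < a) :
    PySem.List.pyRange a b (-2) = [] := by
  simp [PySem.List.pyRange, h]

theorem pyRange_neg_two_cons (a b : Int) (h : b < a) :
    PySem.List.pyRange a b (-2) = a :: PySem.List.pyRange (a - 2) b (-2) := by
  simp only [PySem.List.pyRange]
  norm_num [h]
  by_cases h2 : b < a - 2
  · have hc : ((a - b + 2 - 1) / 2).toNat = ((a - 2 - b + 2 - 1) / 2).toNat + 1 := by omega
    rw [if_pos h2, hc, List.range_succ_eq_map]
    simp [List.map_map, Function.comp]
    intro k _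
    ring
  · have hc : ((a - b + 2 - 1) / 2).toNat = 1 := by omega
    rw [if_neg h2, hc]
    simp [List.range_succ]

theorem pyRange_eq_evensDown (n : Nat) :
    PySem.List.pyRange ((n : Int) - (n : Int) % 2) 0 (-2) = evensDown n := by
  induction n with
  | zero => rw [pyRange_neg_two_nil _ _ (by omega)]; rfl
  | succ n ih =>
      by_cases he : ((n : Int) + 1) % 2 = 0
      · have h1 : ((n + 1 : Nat) : Int) - ((n + 1 : Nat) : Int) % 2 = (n : Int) + 1 := by
          push_cast; omega
        have h2 : (n : Int) + 1 - 2 = (n : Int) - (n : Int) % 2 := by omega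
        rw [h1, pyRange_neg_two_cons _ _ (by omega), h2, ih]
        simp [evensDown, he]
      · have h1 : ((n + 1 : Nat) : Int) - ((n + 1 : Nat) : Int) % 2 = (n : Int) - (n : Int) % 2 := by
          push_cast; omega
        rw [h1, ih]
        simp [evensDown, he]

-- ===== VERDICT (by name: the statement is the Claim_ definition above) =====
theorem allEven_spec : Claim_equal_allEven := by
  intro value _
  unfold Spec_allEven allEven allEven_alt
  rw [allEvenLoop_eq value.toNat value rfl [], List.nil_append]
  have hm : PySem.Int.mod value 2 = value % 2 :=
    PySem.Int.mod_eq_emod_of_pos (by omega)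
  rw [hm]
  by_cases hv : 0 < value
  · have : value = ((value.toNat : Nat) : Int) := by omega
    rw [← pyRange_eq_evensDown value.toNat]
    congr 1; omega
  · have h0 : value.toNat = 0 := by omega
    rw [h0, pyRange_neg_two_nil _ _ (by omega)]
    rfl
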